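-- pv_equiv track=rewrite | github.com/silvioiatech/Umbra | umbra/core/logger.py | sanitize_log_data
-- ===== SOURCE A (Python) =====
-- def sanitize_log_data(data: str) -> str:
--     """Sanitize sensitive data from logs."""
--     sensitive_patterns = [
--         'token', 'key', 'secret', 'password', 'auth'
--     ]
--
--     sanitized = data
--     for pattern in sensitive_patterns:
--         if pattern.lower() in sanitized.lower():
--             # Replace with asterisks, keeping first and last 4 characters
--             if len(sanitized) > 8:
--                 sanitized = sanitized[:4] + '*' * (len(sanitized) - 8) + sanitized[-4:]
--             else:
--                 sanitized = '*' * len(sanitized)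
--
--     return sanitized
-- ===== SOURCE B (Python) =====
-- def sanitize_log_data(data: str) -> str:
--     """Sanitize sensitive data from logs."""
--     # single left-to-right scan of the text, dispatching on the first character
--     # (the five patterns have pairwise distinct first letters)
--     by_first = {'t': 'token', 'k': 'key', 's': 'secret', 'p': 'password', 'a': 'auth'}
--     lower = data.lower()
--     hit = False
--     for i, c in enumerate(lower):
--         p = by_first.get(c)
--         if p is not None and lower.startswith(p, i):
--             hit = True
--             break
--     if not hit:
--         return data
--     if len(data) > 8:
--         return data[:4] + '*' * (len(data) - 8) + data[-4:]
--     return '*' * len(data)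
-- ===== Notes on version B (the rewrite author's own statement) =====
-- stated objective: alternative
-- what changed: B replaces A's pattern-driven loop of repeated substring searches over the re-masked string by a single text-driven scan: it walks the lowercased input once, dispatching each position through a dict keyed by the pattern's first character (the five patterns have distinct first letters) and checking one startswith there, then masks at most once (correct since the mask is idempotent and masking cannot create a new match).
import Mathlib
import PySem

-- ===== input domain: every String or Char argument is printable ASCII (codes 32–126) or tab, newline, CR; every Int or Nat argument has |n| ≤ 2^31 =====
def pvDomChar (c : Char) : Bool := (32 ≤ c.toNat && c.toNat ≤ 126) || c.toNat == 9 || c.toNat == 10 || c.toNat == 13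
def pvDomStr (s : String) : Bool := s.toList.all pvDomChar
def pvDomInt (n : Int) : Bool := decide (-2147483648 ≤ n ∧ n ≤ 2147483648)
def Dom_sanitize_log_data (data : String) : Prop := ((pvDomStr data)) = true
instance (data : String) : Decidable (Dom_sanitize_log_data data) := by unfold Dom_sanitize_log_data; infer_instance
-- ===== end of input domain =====

-- B replaces A's pattern-driven loop (one substring search per pattern over the re-masked string)
-- by a single text-driven scan of the lowercased input with first-character dispatch, masking at most once.

-- ===== PORT A =====
def pvMaskStepA (sanitized pattern : String) : String :=
  if PySem.Str.isIn (PySem.Str.lower pattern) (PySem.Str.lower sanitized) then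
    if PySem.Str.len sanitized > 8 then
      PySem.Str.slice sanitized none (some 4)
        ++ String.ofList (List.replicate (PySem.Str.len sanitized - 8).toNat '*')
        ++ PySem.Str.slice sanitized (some (-4)) none
    else
      String.ofList (List.replicate (PySem.Str.len sanitized).toNat '*')
  else sanitized

def sanitize_log_data (data : String) : String :=
  ["token", "key", "secret", "password", "auth"].foldl pvMaskStepA data

-- ===== PORT B =====
-- Source B's by_first dict: first character ↦ the (unique) pattern starting with it
def pvByFirst (c : Char) : Option (List Char) :=
  if c = 't' then some "token".toList
  else if c = 'k' then some "key".toList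
  else if c = 's' then some "secret".toList
  else if c = 'p' then some "password".toList
  else if c = 'a' then some "auth".toList
  else none

-- Source B's `for i, c in enumerate(lower): … lower.startswith(p, i)` loop:
-- structural recursion over the suffixes of the lowercased text, with early exit on a hit
def pvScan : List Char → Bool
  | [] => false
  | c :: rest =>
    (match pvByFirst c with
     | some p => PySem.Chars.startswith (c :: rest) p
     | none => false) || pvScan rest

def sanitize_log_data_alt (data : String) : String :=
  let lower := PySem.Str.lower data
  if pvScan lower.toList then
    if PySem.Str.len data > 8 then
      PySem.Str.slice data none (some 4)
        ++ String.ofList (List.replicate (PySem.Str.len data - 8).toNat '*')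
        ++ PySem.Str.slice data (some (-4)) none
    else
      String.ofList (List.replicate (PySem.Str.len data).toNat '*')
  else data

-- ===== PRECONDITION & SPEC =====
def Spec_sanitize_log_data (data : String) (out : String) : Prop := out = sanitize_log_data_alt data
instance (data : String) (out : String) : Decidable (Spec_sanitize_log_data data out) := by unfold Spec_sanitize_log_data; infer_instance

-- ===== CLAIM (what is proved, stated in full; the proofs are below) =====
def Claim_equal_sanitize_log_data : Prop := ∀ (data : String), Dom_sanitize_log_data data → Spec_sanitize_log_data data (sanitize_log_data data)

-- ===== LEMMAS AND PROOFS =====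

def pvMaskL (l : List Char) : List Char :=
  if 8 < l.length then
    l.take 4 ++ List.replicate (l.length - 8) '*' ++ l.drop (l.length - 4)
  else
    List.replicate l.length '*'

theorem pvMask_toList (s : String) :
    (if PySem.Str.len s > 8 then
        PySem.Str.slice s none (some 4)
          ++ String.ofList (List.replicate (PySem.Str.len s - 8).toNat '*')
          ++ PySem.Str.slice s (some (-4)) none
      else
        String.ofList (List.replicate (PySem.Str.len s).toNat '*')).toList
      = pvMaskL s.toList := by
  unfold pvMaskL
  by_cases h : 8 < s.toList.length
  · rw [if_pos (by simpa [PySem.Str.len_eq] using h), if_pos h]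
    have h' : 8 < s.length := by simpa using h
    simp [PySem.Str.slice, pysem]
    omega
  · rw [if_neg (by simpa [PySem.Str.len_eq] using h), if_neg h]
    simp [PySem.Str.len_eq]

theorem pvMaskL_length (l : List Char) : (pvMaskL l).length = l.length := by
  unfold pvMaskL
  split_ifs with h
  · simp; omega
  · simp

theorem pvMaskL_big (l : List Char) (h : 8 < l.length) :
    pvMaskL l = l.take 4 ++ List.replicate (l.length - 8) '*' ++ l.drop (l.length - 4) := by
  unfold pvMaskL; rw [if_pos h]

theorem pvMaskL_idem (l : List Char) : pvMaskL (pvMaskL l) = pvMaskL l := by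
  by_cases h : 8 < l.length
  · have hlen : (pvMaskL l).length = l.length := pvMaskL_length l
    have htk : (pvMaskL l).take 4 = l.take 4 := by
      rw [pvMaskL_big l h]
      rw [List.append_assoc, List.take_append_of_le_length (by simp; omega)]
      simp [List.take_take]
    have hdr : (pvMaskL l).drop (l.length - 4) = l.drop (l.length - 4) := by
      have hml' : pvMaskL l
          = (l.take 4 ++ List.replicate (l.length - 8) '*') ++ l.drop (l.length - 4) := by
        rw [pvMaskL_big l h, List.append_assoc, ← List.append_assoc]
      have hpre : (l.take 4 ++ List.replicate (l.length - 8) '*').length = l.length - 4 := by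
        rw [List.length_append, List.length_take, List.length_replicate]
        omega
      rw [hml', List.drop_left' hpre]
    rw [pvMaskL_big (pvMaskL l) (by rw [hlen]; exact h), hlen, htk, hdr, ← pvMaskL_big l h]
  · have hml : pvMaskL l = List.replicate l.length '*' := by
      unfold pvMaskL; rw [if_neg h]
    rw [hml]
    unfold pvMaskL
    simp [if_neg h]

theorem pvStepA_toList (s p : String) :
    (pvMaskStepA s p).toList
      = if PySem.Chars.isIn (PySem.Chars.lower p.toList) (PySem.Chars.lower s.toList)
        then pvMaskL s.toList else s.toList := by
  have hcond : PySem.Str.isIn (PySem.Str.lower p) (PySem.Str.lower s)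
      = PySem.Chars.isIn (PySem.Chars.lower p.toList) (PySem.Chars.lower s.toList) := by
    simp [PySem.Str.isIn_eq, PySem.Str.lower]
  unfold pvMaskStepA
  rw [hcond]
  by_cases h : PySem.Chars.isIn (PySem.Chars.lower p.toList) (PySem.Chars.lower s.toList) = true
  · rw [if_pos h, if_pos h]
    exact pvMask_toList s
  · rw [if_neg h, if_neg h]

theorem pvFoldA (ps : List String) (d : String) :
    (ps.foldl pvMaskStepA d).toList
      = if ps.any (fun p => PySem.Chars.isIn (PySem.Chars.lower p.toList)
            (PySem.Chars.lower d.toList))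
        then pvMaskL d.toList else d.toList := by
  induction ps generalizing d with
  | nil => simp
  | cons p rest ih =>
    simp only [List.foldl_cons, List.any_cons]
    by_cases h : PySem.Chars.isIn (PySem.Chars.lower p.toList)
        (PySem.Chars.lower d.toList) = true
    · have hd' : (pvMaskStepA d p).toList = pvMaskL d.toList := by
        rw [pvStepA_toList, if_pos h]
      rw [ih (pvMaskStepA d p), hd']
      simp only [h, Bool.true_or, if_true]
      split_ifs with h2
      · exact pvMaskL_idem d.toList
      · rfl
    · have hd' : pvMaskStepA d p = d := by
        apply String.toList_inj.mp
        rw [pvStepA_toList, if_neg h]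
      rw [hd', ih d]
      simp [h]

-- substring test unfolds over a cons: prefix here or substring of the tail
theorem pvIsIn_cons (p : List Char) (c : Char) (rest : List Char) :
    PySem.Chars.isIn p (c :: rest)
      = (PySem.Chars.startswith (c :: rest) p || PySem.Chars.isIn p rest) := by
  rw [Bool.eq_iff_iff]
  simp [PySem.Chars.isIn_iff_infix, PySem.Chars.startswith_iff, List.infix_cons_iff]

-- string-literal patterns as explicit character lists
theorem pvTok : "token".toList = ['t','o','k','e','n'] := rfl
theorem pvKey : "key".toList = ['k','e','y'] := rfl
theorem pvSec : "secret".toList = ['s','e','c','r','e','t'] := rfl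
theorem pvPas : "password".toList = ['p','a','s','s','w','o','r','d'] := rfl
theorem pvAut : "auth".toList = ['a','u','t','h'] := rfl

-- startswith unfolds over a cons pattern
theorem pvSW_cons (c : Char) (rest : List Char) (a : Char) (p' : List Char) :
    PySem.Chars.startswith (c :: rest) (a :: p')
      = (decide (a = c) && PySem.Chars.startswith rest p') := by
  rw [Bool.eq_iff_iff]
  simp only [Bool.and_eq_true, decide_eq_true_eq, PySem.Chars.startswith_iff,
    List.cons_prefix_cons]

-- the scanner's per-position dispatch equals "some pattern starts here"
theorem pvDispatch_step (c : Char) (rest : List Char) :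
    (match pvByFirst c with
     | some p => PySem.Chars.startswith (c :: rest) p
     | none => false)
      = (["token", "key", "secret", "password", "auth"] : List String).any
          (fun p => PySem.Chars.startswith (c :: rest) p.toList) := by
  unfold pvByFirst
  by_cases h1 : c = 't'
  · subst h1; simp [pvTok, pvKey, pvSec, pvPas, pvAut, pvSW_cons]
  · by_cases h2 : c = 'k'
    · subst h2; simp [h1, pvTok, pvKey, pvSec, pvPas, pvAut, pvSW_cons]
    · by_cases h3 : c = 's'
      · subst h3; simp [h1, h2, pvTok, pvKey, pvSec, pvPas, pvAut, pvSW_cons]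
      · by_cases h4 : c = 'p'
        · subst h4; simp [h1, h2, h3, pvTok, pvKey, pvSec, pvPas, pvAut, pvSW_cons]
        · by_cases h5 : c = 'a'
          · subst h5; simp [h1, h2, h3, h4, pvTok, pvKey, pvSec, pvPas, pvAut, pvSW_cons]
          · simp [h1, h2, h3, h4, h5, pvTok, pvKey, pvSec, pvPas, pvAut, pvSW_cons,
              Ne.symm h1, Ne.symm h2, Ne.symm h3, Ne.symm h4, Ne.symm h5]

theorem pvScan_iff (l : List Char) :
    pvScan l
      = (["token", "key", "secret", "password", "auth"] : List String).any
          (fun p => PySem.Chars.isIn p.toList l) := by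
  induction l with
  | nil => decide
  | cons c rest ih =>
    show ((match pvByFirst c with
           | some p => PySem.Chars.startswith (c :: rest) p
           | none => false) || pvScan rest) = _
    rw [pvDispatch_step, ih]
    rw [Bool.eq_iff_iff]
    simp only [Bool.or_eq_true, List.any_eq_true, pvIsIn_cons]
    constructor
    · rintro (⟨p, hp, h⟩ | ⟨p, hp, h⟩)
      · exact ⟨p, hp, by simp [h]⟩
      · exact ⟨p, hp, by simp [h]⟩
    · rintro ⟨p, hp, h⟩
      rcases h with h' | h'
      · exact Or.inl ⟨p, hp, h'⟩
      · exact Or.inr ⟨p, hp, h'⟩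

-- the five concrete patterns are already lowercase
theorem pvPatterns_lower :
    ∀ p ∈ (["token", "key", "secret", "password", "auth"] : List String),
      PySem.Chars.lower p.toList = p.toList := by decide

-- ===== VERDICT (by name: the statement is the Claim_ definition above) =====
theorem sanitize_log_data_spec : Claim_equal_sanitize_log_data := by
  intro data _
  unfold Spec_sanitize_log_data
  apply String.toList_inj.mp
  unfold sanitize_log_data
  rw [pvFoldA]
  have hany : (["token", "key", "secret", "password", "auth"] : List String).any
        (fun p => PySem.Chars.isIn (PySem.Chars.lower p.toList) (PySem.Chars.lower data.toList))
      = pvScan (PySem.Str.lower data).toList := by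
    rw [show (PySem.Str.lower data).toList = PySem.Chars.lower data.toList from
      PySem.Str.toList_lower data]
    rw [pvScan_iff]
    apply PySem.List.any_congr_mem
    intro p hp
    rw [pvPatterns_lower p hp]
  rw [hany]
  unfold sanitize_log_data_alt
  by_cases h : pvScan (PySem.Str.lower data).toList = true
  · rw [if_pos h]
    simp only [h, if_true]
    exact (pvMask_toList data).symm
  · rw [if_neg h]
    simp only [h]
    simp
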